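-- pv_equiv track=rewrite | github.com/sakuralggm/algorithm_training | bytedance/最大连续子数组和问题.py | solution
-- ===== SOURCE A (Python) =====
-- def solution(n: int, x: int, a: list) -> int:
--     # 将a数组中的最小值替换为x
--     m = min(a)
--     if x < m:
--         a[a.index(m)] = x
--     pre, suf = [0] * (n + 1), [0] * (n + 1)
--     for i in range(n):
--         pre[i] = max(0, pre[i - 1] + a[i - 1] if i > 0 else 0)
--     for i in range(n - 1, -1, -1):
--         suf[i] = max(0, suf[i + 1] + a[i + 1] if i < n - 1 else 0)
--     return max(pre[i] + suf[i] + max(x, a[i]) for i in range(n))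
-- ===== SOURCE B (Python) =====
-- def solution(n: int, x: int, a: list) -> int:
--     # same preamble as A: replace the first minimum by x when x is smaller (mutates a)
--     m = min(a)
--     if x < m:
--         a[a.index(m)] = x
--     # single forward two-state Kadane pass:
--     #   f    = max(0, best plain subarray sum ending just before i)
--     #   g    = best subarray sum ending at i with exactly one element boosted to max(x, .)
--     #   best = running maximum of g
--     best = None
--     f = 0
--     g = None
--     for i in range(n):
--         v = a[i]
--         boosted = max(x, v) + f
--         g = boosted if g is None else max(boosted, v + g)
--         best = g if best is None else max(best, g)
--         f = max(0, f + v)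
--     return best
-- ===== Notes on version B (the rewrite author's own statement) =====
-- stated objective: alternative
-- what changed: Replaces the prefix/suffix arrays plus a combining max-scan by a single forward two-state Kadane pass (best plain sum ending here, best one-boosted sum ending here) with a running maximum, keeping A's min-replacement preamble.
import Mathlib
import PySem

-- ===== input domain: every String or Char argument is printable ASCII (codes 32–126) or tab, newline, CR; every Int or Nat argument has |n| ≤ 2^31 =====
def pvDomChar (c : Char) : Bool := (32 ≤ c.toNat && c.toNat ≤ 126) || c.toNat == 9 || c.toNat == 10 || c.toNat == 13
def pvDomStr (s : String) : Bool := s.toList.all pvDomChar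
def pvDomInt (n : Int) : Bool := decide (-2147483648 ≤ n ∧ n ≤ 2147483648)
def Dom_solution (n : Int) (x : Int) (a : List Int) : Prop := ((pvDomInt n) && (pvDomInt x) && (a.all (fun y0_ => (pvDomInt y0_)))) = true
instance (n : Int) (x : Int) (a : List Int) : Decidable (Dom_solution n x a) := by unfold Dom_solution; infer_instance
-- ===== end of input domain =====

-- B replaces A's prefix/suffix arrays and combining scan by a single forward two-state
-- Kadane pass (objective: alternative; O(1) instead of O(n) extra space).  Both A and B
-- mutate `a` in place in the same way (first minimum replaced by x when x < min(a));
-- the theorems below are about the RETURN value.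

-- ===== PORT A =====
-- shared preamble of A and B (the same two Python lines in both):
--   m = min(a); if x < m: a[a.index(m)] = x
def pyMutate (x : Int) (a : List Int) : List Int :=
  match PySem.List.min? a (fun v => v) with
  | none => a          -- Python: min([]) raises ValueError; excluded by Pre_
  | some m =>
    if x < m then
      match PySem.List.index? a m with
      | some i => a.set i x
      | none => a      -- unreachable (m ∈ a)
    else a

-- the Python lists pre/suf (only ever read at in-range non-negative indices under Pre_)
-- are modeled as index functions; each write pre[i] = v is a pointwise update.
def preStep (a2 : List Int) (F : Int → Int) (i : Int) : Int → Int :=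
  fun j => if j = i then max 0 (if 0 < i then F (i-1) + PySem.List.pyGetD a2 (i-1) 0 else 0) else F j

def preLoop (a2 : List Int) (n : Int) : Int → Int :=
  (PySem.List.pyRange 0 n 1).foldl (preStep a2) (fun _ => 0)

def sufStep (a2 : List Int) (n : Int) (F : Int → Int) (i : Int) : Int → Int :=
  fun j => if j = i then max 0 (if i < n - 1 then F (i+1) + PySem.List.pyGetD a2 (i+1) 0 else 0) else F j

def sufLoop (a2 : List Int) (n : Int) : Int → Int :=
  (PySem.List.pyRange (n-1) (-1) (-1)).foldl (sufStep a2 n) (fun _ => 0)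

def solution (n : Int) (x : Int) (a : List Int) : Int :=
  let a2 := pyMutate x a
  match (PySem.List.pyRange 0 n 1).map
      (fun i => preLoop a2 n i + sufLoop a2 n i + max x (PySem.List.pyGetD a2 i 0)) with
  | [] => 0            -- Python: max() of an empty generator raises ValueError; excluded by Pre_
  | t :: ts => ts.foldl max t

-- ===== PORT B =====
-- state (best, f, g): best = running max of g, f = max(0, best plain sum ending just
-- before i), g = best one-boosted sum ending at the previous index (None before the first step)
def kadStep (x : Int) (a2 : List Int) (st : Option Int × Int × Option Int) (i : Int) :
    Option Int × Int × Option Int :=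
  let v := PySem.List.pyGetD a2 i 0
  let boosted := max x v + st.2.1
  let g : Int := match st.2.2 with | none => boosted | some g0 => max boosted (v + g0)
  let best : Int := match st.1 with | none => g | some b => max b g
  (some best, max 0 (st.2.1 + v), some g)

def kadanLoop (x : Int) (a2 : List Int) (n : Int) : Option Int × Int × Option Int :=
  (PySem.List.pyRange 0 n 1).foldl (kadStep x a2) (none, 0, none)

def solution_alt (n : Int) (x : Int) (a : List Int) : Int :=
  let a2 := pyMutate x a
  match (kadanLoop x a2 n).1 with
  | none => 0          -- Python B returns None here (only when n ≤ 0); excluded by Pre_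
  | some b => b

-- ===== PRECONDITION & SPEC =====
-- exactly the inputs where the Python A returns: a must be nonempty (min) and
-- 1 ≤ n ≤ len(a) (for n = 0 the final max() raises; for n > len(a) an index is out of range)
def Pre_solution (n : Int) (x : Int) (a : List Int) : Prop := 1 ≤ n ∧ n ≤ (a.length : Int)
instance (n : Int) (x : Int) (a : List Int) : Decidable (Pre_solution n x a) := by
  unfold Pre_solution; infer_instance

def pvWitness_solution : Int × Int × List Int := (2, 5, [1, -3])

def Spec_solution (n : Int) (x : Int) (a : List Int) (out : Int) : Prop := out = solution_alt n x a
instance (n : Int) (x : Int) (a : List Int) (out : Int) : Decidable (Spec_solution n x a out) := by unfold Spec_solution; infer_instance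

-- ===== CLAIM (what is proved, stated in full; the proofs are below) =====
def Claim_equal_solution : Prop := ∀ (n : Int) (x : Int) (a : List Int), Dom_solution n x a → Pre_solution n x a → Spec_solution n x a (solution n x a)

-- ===== LEMMAS AND PROOFS =====

-- the mutated array, read as a total function on Nat indices
def cF (a2 : List Int) : Nat → Int := fun k => a2.getD k 0

-- prefix sums of cF
def Wp (c : Nat → Int) : Nat → Int
  | 0 => 0
  | k+1 => Wp c k + c k

-- Pp k = value of A's pre[k]  (clamped best plain sum ending just before k)
def Pp (c : Nat → Int) : Nat → Int
  | 0 => 0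
  | k+1 => max 0 (Pp c k + c k)

-- SBf N i = value of A's suf[i] for array length N
def SBf (c : Nat → Int) (N : Nat) (i : Nat) : Int :=
  if N ≤ i + 1 then 0 else max 0 (SBf c N (i+1) + c (i+1))
termination_by N - i
decreasing_by omega

-- A's i-th candidate term
def Tm (x : Int) (c : Nat → Int) (N : Nat) (i : Nat) : Int :=
  Pp c i + SBf c N i + max x (c i)

-- boost-at-i with clamped left part
def hB (x : Int) (c : Nat → Int) (i : Nat) : Int := max x (c i) + Pp c i

-- B's g state after step i
def gB (x : Int) (c : Nat → Int) : Nat → Int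
  | 0 => hB x c 0
  | k+1 => max (hB x c (k+1)) (c (k+1) + gB x c k)

-- running max of u over 0..k
def FmGen (u : Nat → Int) : Nat → Int
  | 0 => u 0
  | k+1 => max (FmGen u k) (u (k+1))

-- GH m k = max over j ≤ k of (hB j + (Wp m - Wp (j+1)))
def GH (x : Int) (c : Nat → Int) (m : Nat) : Nat → Int
  | 0 => hB x c 0 + (Wp c m - Wp c 1)
  | k+1 => max (GH x c m k) (hB x c (k+1) + (Wp c m - Wp c (k+2)))

lemma SBf_stop (c : Nat → Int) (N i : Nat) (h : N ≤ i + 1) : SBf c N i = 0 := by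
  rw [SBf]; simp [h]

lemma SBf_go (c : Nat → Int) (N i : Nat) (h : i + 1 < N) :
    SBf c N i = max 0 (SBf c N (i+1) + c (i+1)) := by
  rw [SBf]; simp [Nat.not_le.mpr h]

lemma GH_succ_m (x : Int) (c : Nat → Int) (m : Nat) : ∀ k, GH x c (m+1) k = GH x c m k + c m := by
  intro k
  induction k with
  | zero => show hB x c 0 + (Wp c m + c m - Wp c 1) = hB x c 0 + (Wp c m - Wp c 1) + c m; ring
  | succ k ih =>
      show max (GH x c (m+1) k) (hB x c (k+1) + (Wp c m + c m - Wp c (k+2)))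
            = max (GH x c m k) (hB x c (k+1) + (Wp c m - Wp c (k+2))) + c m
      rw [ih]; omega

lemma gB_eq_GH (x : Int) (c : Nat → Int) : ∀ k, gB x c k = GH x c (k+1) k := by
  intro k
  induction k with
  | zero => show hB x c 0 = hB x c 0 + (Wp c 1 - Wp c 1); omega
  | succ k ih =>
      have h := GH_succ_m x c (k+1) k
      show max (hB x c (k+1)) (c (k+1) + gB x c k)
            = max (GH x c (k+1+1) k) (hB x c (k+1) + (Wp c (k+1+1) - Wp c (k+1+1)))
      rw [ih, h]; omega

lemma SBf_succN (c : Nat → Int) (N : Nat) :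
    ∀ i, i < N → SBf c (N+1) i = max (SBf c N i) (Wp c (N+1) - Wp c (i+1)) := by
  have key : ∀ d i, i < N → N - i = d + 1 →
      SBf c (N+1) i = max (SBf c N i) (Wp c (N+1) - Wp c (i+1)) := by
    intro d
    induction d with
    | zero =>
        intro i hi hd
        have hiN : i = N - 1 := by omega
        have h1 : SBf c (N+1) i = max 0 (SBf c (N+1) (i+1) + c (i+1)) := SBf_go _ _ _ (by omega)
        have h2 : SBf c (N+1) (i+1) = 0 := SBf_stop _ _ _ (by omega)
        have h3 : SBf c N i = 0 := SBf_stop _ _ _ (by omega)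
        have h4 : i + 2 = N + 1 := by omega
        have h5 : Wp c (N+1) = Wp c (i+1) + c (i+1) := by rw [← h4]; rfl
        rw [h1, h2, h3]; omega
    | succ d ih =>
        intro i hi hd
        have h1 : SBf c (N+1) i = max 0 (SBf c (N+1) (i+1) + c (i+1)) := SBf_go _ _ _ (by omega)
        have h2 : SBf c N i = max 0 (SBf c N (i+1) + c (i+1)) := SBf_go _ _ _ (by omega)
        have h3 : SBf c (N+1) (i+1) = max (SBf c N (i+1)) (Wp c (N+1) - Wp c (i+2)) :=
          ih (i+1) (by omega) (by omega)
        have h5 : Wp c (i+2) = Wp c (i+1) + c (i+1) := rfl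
        rw [h1, h2, h3]; omega
  intro i hi
  exact key (N - i - 1) i hi (by omega)

lemma Fm_succN (x : Int) (c : Nat → Int) (N : Nat) :
    ∀ k, k < N → FmGen (Tm x c (N+1)) k = max (FmGen (Tm x c N) k) (GH x c (N+1) k) := by
  intro k
  induction k with
  | zero =>
      intro h0
      show Tm x c (N+1) 0 = max (Tm x c N 0) (GH x c (N+1) 0)
      unfold Tm GH hB
      rw [SBf_succN c N 0 h0]
      have : Wp c 1 = Wp c 0 + c 0 := rfl
      unfold Pp Wp at *
      omega
  | succ k ih =>
      intro hk
      show max (FmGen (Tm x c (N+1)) k) (Tm x c (N+1) (k+1))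
            = max (max (FmGen (Tm x c N) k) (Tm x c N (k+1))) (GH x c (N+1) (k+1))
      rw [ih (by omega)]
      have hT : Tm x c (N+1) (k+1)
          = max (Tm x c N (k+1)) (hB x c (k+1) + (Wp c (N+1) - Wp c (k+1+1))) := by
        unfold Tm hB
        rw [SBf_succN c N (k+1) hk]
        omega
      show _ = max (max (FmGen (Tm x c N) k) (Tm x c N (k+1)))
                    (max (GH x c (N+1) k) (hB x c (k+1) + (Wp c (N+1) - Wp c (k+1+1))))
      rw [hT]
      omega

lemma main_identity (x : Int) (c : Nat → Int) :
    ∀ N, FmGen (Tm x c (N+1)) N = FmGen (gB x c) N := by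
  intro N
  induction N with
  | zero =>
      show Tm x c 1 0 = gB x c 0
      unfold Tm gB hB
      rw [SBf_stop c 1 0 (by omega)]
      omega
  | succ N ih =>
      show max (FmGen (Tm x c (N+1+1)) N) (Tm x c (N+1+1) (N+1)) = max (FmGen (gB x c) N) (gB x c (N+1))
      rw [Fm_succN x c (N+1) N (by omega), ih]
      have h1 : Tm x c (N+1+1) (N+1) = hB x c (N+1) := by
        unfold Tm hB; rw [SBf_stop c (N+1+1) (N+1) (by omega)]; ring
      have h2 : gB x c (N+1) = max (GH x c (N+1+1) N) (hB x c (N+1) + (Wp c (N+1+1) - Wp c (N+1+1))) :=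
        gB_eq_GH x c (N+1)
      rw [h1, h2]; omega

-- ===== bridges between the ports' folds and the recursions above =====

lemma pyGetD_toNat (a2 : List Int) (i : Int) (hi : 0 ≤ i) :
    PySem.List.pyGetD a2 i 0 = cF a2 i.toNat := by
  rw [← Int.toNat_of_nonneg hi, PySem.List.pyGetD_natCast]; rfl

lemma preLoop_eval (a2 : List Int) (N : Nat) :
    ∀ t : Int, preLoop a2 ((N : Nat) : Int) t
      = if 0 ≤ t ∧ t < (N : Int) then Pp (cF a2) t.toNat else 0 := by
  induction N with
  | zero =>
      intro t
      unfold preLoop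
      rw [PySem.List.pyRange_one_eq_nil (by omega)]
      simp only [List.foldl_nil]
      rw [if_neg (by omega)]
  | succ N ih =>
      intro t
      unfold preLoop
      have hcast : ((N + 1 : Nat) : Int) = (N : Int) + 1 := by push_cast; ring
      rw [hcast, PySem.List.pyRange_one_succ_right (by omega), List.foldl_append]
      show preStep a2 (preLoop a2 (N : Int)) (N : Int) t = _
      unfold preStep
      by_cases ht : t = (N : Int)
      · subst ht
        by_cases hN : 0 < (N : Int)
        · obtain ⟨M, rfl⟩ : ∃ M : Nat, N = M + 1 := ⟨N - 1, by omega⟩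
          have h1 : ((M + 1 : Nat) : Int) - 1 = (M : Int) := by push_cast; ring
          rw [if_pos rfl, if_pos hN, h1, ih, pyGetD_toNat a2 (M : Int) (by omega)]
          simp only [Int.toNat_natCast]
          rw [if_pos (⟨by omega, by omega⟩ : (0:Int) ≤ (M:Int) ∧ (M:Int) < ((M+1:Nat):Int)),
              if_pos (⟨by omega, by omega⟩ : (0:Int) ≤ ((M+1:Nat):Int) ∧ ((M+1:Nat):Int) < ((M+1:Nat):Int) + 1)]
          rfl
        · have hN0 : N = 0 := by omega
          subst hN0
          rw [if_pos rfl, if_neg hN]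
          simp [Pp]
      · rw [if_neg ht, ih]
        have : (0 ≤ t ∧ t < (N : Int)) ↔ (0 ≤ t ∧ t < ((N:Int) + 1)) := by
          constructor <;> (intro h; exact ⟨h.1, by omega⟩)
        by_cases hc : 0 ≤ t ∧ t < (N : Int)
        · rw [if_pos hc, if_pos ⟨hc.1, by omega⟩]
        · rw [if_neg hc, if_neg (by omega)]

lemma sufFold_eval (a2 : List Int) (N : Nat) :
    ∀ (k : Nat), k ≤ N → ∀ (F : Int → Int),
      (∀ j : Nat, j < N → k ≤ j → F (j : Int) = SBf (cF a2) N j) →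
      ∀ t : Int,
        ((PySem.List.pyRange ((k : Int) - 1) (-1) (-1)).foldl (sufStep a2 ((N : Nat) : Int)) F) t
          = if 0 ≤ t ∧ t < (k : Int) then SBf (cF a2) N t.toNat else F t := by
  intro k
  induction k with
  | zero =>
      intro _ F _ t
      rw [PySem.List.pyRange_neg_one_eq_nil (by omega)]
      simp only [List.foldl_nil]
      rw [if_neg (by omega)]
  | succ k ih =>
      intro hkN F hF t
      have hcast : ((k + 1 : Nat) : Int) - 1 = (k : Int) := by push_cast; ring
      rw [hcast, PySem.List.pyRange_neg_one_cons (by omega)]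
      show ((PySem.List.pyRange ((k:Int) - 1) (-1) (-1)).foldl (sufStep a2 (N:Int))
              (sufStep a2 (N:Int) F (k:Int))) t = _
      -- the updated function satisfies the invariant one index lower
      have hF' : ∀ j : Nat, j < N → k ≤ j →
          (sufStep a2 (N:Int) F (k:Int)) (j : Int) = SBf (cF a2) N j := by
        intro j hjN hkj
        unfold sufStep
        by_cases hjk : (j : Int) = (k : Int)
        · have hj : j = k := by omega
          subst hj
          rw [if_pos rfl]
          by_cases hlast : (j : Int) < (N : Int) - 1
          · have h1 : (j : Int) + 1 = ((j + 1 : Nat) : Int) := by push_cast; ring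
            rw [if_pos hlast, h1, hF (j+1) (by omega) (by omega),
                pyGetD_toNat a2 ((j+1:Nat):Int) (by omega)]
            simp only [Int.toNat_natCast]
            exact (SBf_go (cF a2) N j (by omega)).symm
          · rw [if_neg hlast, SBf_stop (cF a2) N j (by omega)]
            simp
        · rw [if_neg hjk]
          exact hF j hjN (by omega)
      rw [ih (by omega) _ hF' t]
      by_cases ht : t = (k : Int)
      · subst ht
        rw [if_neg (by omega), if_pos ⟨by omega, by omega⟩]
        have h2 := hF' k (by omega) (by omega)
        simp only [Int.toNat_natCast]
        exact h2
      · by_cases hc : 0 ≤ t ∧ t < (k : Int)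
        · rw [if_pos hc, if_pos ⟨hc.1, by omega⟩]
        · rw [if_neg hc, if_neg (by omega)]
          unfold sufStep
          rw [if_neg ht]

lemma sufLoop_eval (a2 : List Int) (N : Nat) (t : Int) :
    sufLoop a2 ((N : Nat) : Int) t
      = if 0 ≤ t ∧ t < (N : Int) then SBf (cF a2) N t.toNat else 0 := by
  unfold sufLoop
  exact sufFold_eval a2 N N (le_refl N) (fun _ => 0) (by intro j h1 h2; omega) t

lemma matchMax (u : Nat → Int) :
    ∀ N : Nat,
      (match (PySem.List.pyRange 0 ((N + 1 : Nat) : Int) 1).map (fun i => u i.toNat) with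
        | [] => (0 : Int)
        | t :: ts => ts.foldl max t) = FmGen u N := by
  intro N
  induction N with
  | zero => rw [show ((0+1:Nat):Int) = 0 + 1 by norm_num, PySem.List.pyRange_one_singleton]; rfl
  | succ N ih =>
      have hcast : ((N + 1 + 1 : Nat) : Int) = ((N + 1 : Nat) : Int) + 1 := by push_cast; ring
      rw [hcast, PySem.List.pyRange_one_succ_right (by omega), List.map_append]
      cases h : (PySem.List.pyRange 0 ((N + 1 : Nat) : Int) 1).map (fun i => u i.toNat) with
      | nil =>
          exfalso
          have hlen := congrArg List.length h
          simp only [List.length_map, PySem.List.length_pyRange_one, List.length_nil] at hlen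
          omega
      | cons t ts =>
          rw [h] at ih
          have ih' : ts.foldl max t = FmGen u N := ih
          simp only [List.cons_append, List.foldl_append]
          show max (ts.foldl max t) (u ((N+1:Nat):Int).toNat) = max (FmGen u N) (u (N+1))
          have h2 : ((N+1:Nat):Int).toNat = N + 1 := by omega
          rw [ih', h2]

lemma kadanLoop_eval (x : Int) (a2 : List Int) :
    ∀ N : Nat, kadanLoop x a2 ((N + 1 : Nat) : Int)
      = (some (FmGen (gB x (cF a2)) N), Pp (cF a2) (N+1), some (gB x (cF a2) N)) := by
  intro N
  induction N with
  | zero =>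
      unfold kadanLoop
      rw [show ((0+1:Nat):Int) = 0 + 1 by norm_num, PySem.List.pyRange_one_singleton]
      show kadStep x a2 (none, 0, none) 0 = _
      unfold kadStep
      rw [pyGetD_toNat a2 0 (by omega)]
      show (some (max x (cF a2 (0:Int).toNat) + 0), max 0 (0 + cF a2 (0:Int).toNat),
            some (max x (cF a2 (0:Int).toNat) + 0)) = _
      have h0 : (0:Int).toNat = 0 := rfl
      rw [h0]
      show _ = (some (max x (cF a2 0) + Pp (cF a2) 0), max 0 (Pp (cF a2) 0 + cF a2 0),
                some (max x (cF a2 0) + Pp (cF a2) 0))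
      show _ = (some (max x (cF a2 0) + 0), max 0 (0 + cF a2 0), some (max x (cF a2 0) + 0))
      rfl
  | succ N ih =>
      unfold kadanLoop at *
      have hcast : ((N + 1 + 1 : Nat) : Int) = ((N + 1 : Nat) : Int) + 1 := by push_cast; ring
      rw [hcast, PySem.List.pyRange_one_succ_right (by omega), List.foldl_append]
      rw [ih, List.foldl_cons, List.foldl_nil]
      unfold kadStep
      rw [pyGetD_toNat a2 ((N+1:Nat):Int) (by omega)]
      simp only [Int.toNat_natCast]
      show (some (max (FmGen (gB x (cF a2)) N)
                      (max (max x (cF a2 (N+1)) + Pp (cF a2) (N+1)) (cF a2 (N+1) + gB x (cF a2) N))),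
            max 0 (Pp (cF a2) (N+1) + cF a2 (N+1)),
            some (max (max x (cF a2 (N+1)) + Pp (cF a2) (N+1)) (cF a2 (N+1) + gB x (cF a2) N))) = _
      show _ = (some (max (FmGen (gB x (cF a2)) N) (gB x (cF a2) (N+1))),
                Pp (cF a2) (N+2), some (gB x (cF a2) (N+1)))
      rfl

-- ===== VERDICT (by name: the statement is the Claim_ definition above) =====
theorem solution_spec : Claim_equal_solution := by
  intro n x a _hDom hPre
  unfold Spec_solution
  obtain ⟨h1, h2⟩ := hPre
  obtain ⟨N, rfl⟩ : ∃ N : Nat, n = ((N + 1 : Nat) : Int) := ⟨(n - 1).toNat, by omega⟩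
  unfold solution solution_alt
  show (match (PySem.List.pyRange 0 ((N+1:Nat):Int) 1).map
      (fun i => preLoop (pyMutate x a) ((N+1:Nat):Int) i + sufLoop (pyMutate x a) ((N+1:Nat):Int) i
                + max x (PySem.List.pyGetD (pyMutate x a) i 0)) with
    | [] => (0:Int)
    | t :: ts => ts.foldl max t)
    = (match (kadanLoop x (pyMutate x a) ((N+1:Nat):Int)).1 with
       | none => (0:Int)
       | some b => b)
  rw [kadanLoop_eval]
  show (match (PySem.List.pyRange 0 ((N+1:Nat):Int) 1).map
      (fun i => preLoop (pyMutate x a) ((N+1:Nat):Int) i + sufLoop (pyMutate x a) ((N+1:Nat):Int) i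
                + max x (PySem.List.pyGetD (pyMutate x a) i 0)) with
    | [] => (0:Int)
    | t :: ts => ts.foldl max t) = FmGen (gB x (cF (pyMutate x a))) N
  have hmap : (PySem.List.pyRange 0 ((N+1:Nat):Int) 1).map
      (fun i => preLoop (pyMutate x a) ((N+1:Nat):Int) i + sufLoop (pyMutate x a) ((N+1:Nat):Int) i
                + max x (PySem.List.pyGetD (pyMutate x a) i 0))
      = (PySem.List.pyRange 0 ((N+1:Nat):Int) 1).map (fun i => Tm x (cF (pyMutate x a)) (N+1) i.toNat) := by
    apply List.map_congr_left
    intro i hi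
    rw [PySem.List.mem_pyRange_one] at hi
    rw [preLoop_eval, sufLoop_eval, pyGetD_toNat _ _ hi.1]
    rw [if_pos ⟨hi.1, hi.2⟩, if_pos ⟨hi.1, hi.2⟩]
    rfl
  rw [hmap, matchMax, main_identity]
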